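-- pv_equiv track=rewrite | github.com/VitoMakarevich/leetcode | 1249-minimum-remove-to-make-valid-parentheses/1249-minimum-remove-to-make-valid-parentheses.py | fix
-- ===== SOURCE A (Python) =====
-- def fix(s, open_ch, close_ch):
--   opened = 0
--   res = ''
--   for char in s:
--     if char == open_ch:
--       opened += 1
--       res += char
--     elif char == close_ch:
--       if opened > 0:
--         opened -= 1
--         res += char
--     else:
--       res+=char
--   return res
-- ===== SOURCE B (Python) =====
-- def fix(s, open_ch, close_ch):
--   depth = 0
--   to_remove = set()
--   for i, ch in enumerate(s):
--     if ch == open_ch: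
--       depth += 1
--     elif ch == close_ch:
--       if depth > 0:
--         depth -= 1
--       else:
--         to_remove.add(i)
--   return ''.join(c for i, c in enumerate(s) if i not in to_remove)
-- ===== Notes on version B (the rewrite author's own statement) =====
-- stated objective: alternative
-- what changed: B separates detection from reconstruction: a first pass records the indices of unmatched closing chars in a set, then a second full re-scan of the string filters out those indices, instead of A's single pass that builds the result string inline.
import Mathlib
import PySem

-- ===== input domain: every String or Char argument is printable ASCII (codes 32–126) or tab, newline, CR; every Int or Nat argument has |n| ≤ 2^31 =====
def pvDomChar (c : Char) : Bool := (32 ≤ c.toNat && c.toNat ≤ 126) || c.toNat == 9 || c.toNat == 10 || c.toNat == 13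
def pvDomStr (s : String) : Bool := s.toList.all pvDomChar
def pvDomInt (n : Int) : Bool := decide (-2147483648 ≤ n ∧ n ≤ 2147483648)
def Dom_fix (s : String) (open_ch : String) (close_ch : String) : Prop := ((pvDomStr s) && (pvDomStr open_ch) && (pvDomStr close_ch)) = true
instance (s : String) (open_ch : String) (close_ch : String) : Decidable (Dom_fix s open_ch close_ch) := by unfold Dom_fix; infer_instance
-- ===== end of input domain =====

-- B replaces A's single inline-building loop by two passes — detect the indices of
-- unmatched closing chars into a set, then re-scan the whole string filtering them out
-- (objective: alternative decomposition, same cost).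

-- ===== PORT A =====
-- A's loop: state (opened, res), one char at a time, appending kept chars to res.
def fixLoop (o c : List Char) : List Char → Int → List Char → List Char
  | [], _, res => res
  | ch :: rest, opened, res =>
    if [ch] = o then fixLoop o c rest (opened + 1) (res ++ [ch])
    else if [ch] = c then
      (if opened > 0 then fixLoop o c rest (opened - 1) (res ++ [ch])
       else fixLoop o c rest opened res)
    else fixLoop o c rest opened (res ++ [ch])

def fix (s : String) (open_ch : String) (close_ch : String) : String :=
  String.ofList (fixLoop open_ch.toList close_ch.toList s.toList 0 [])

-- ===== PORT B =====
-- B's first pass: over enumerate(s), depth counter, collecting removal indices into a set.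
def fixAltScan (o c : List Char) : List (Int × Char) → Int → PySem.Set Int → PySem.Set Int
  | [], _, rem => rem
  | (i, ch) :: rest, depth, rem =>
    if [ch] = o then fixAltScan o c rest (depth + 1) rem
    else if [ch] = c then
      (if depth > 0 then fixAltScan o c rest (depth - 1) rem
       else fixAltScan o c rest depth (PySem.Set.add rem i))
    else fixAltScan o c rest depth rem

-- B's second pass: filter the full enumeration by membership in the removal set.
def fix_alt (s : String) (open_ch : String) (close_ch : String) : String :=
  let rem := fixAltScan open_ch.toList close_ch.toList (PySem.List.enumerate s.toList 0) 0 PySem.Set.empty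
  String.ofList (((PySem.List.enumerate s.toList 0).filter
    (fun p => !(PySem.Set.contains rem p.1))).map (·.2))

-- ===== PRECONDITION & SPEC =====
def Spec_fix (s : String) (open_ch : String) (close_ch : String) (out : String) : Prop := out = fix_alt s open_ch close_ch
instance (s : String) (open_ch : String) (close_ch : String) (out : String) : Decidable (Spec_fix s open_ch close_ch out) := by unfold Spec_fix; infer_instance

-- ===== CLAIM (what is proved, stated in full; the proofs are below) =====
def Claim_equal_fix : Prop := ∀ (s : String) (open_ch : String) (close_ch : String), Dom_fix s open_ch close_ch → Spec_fix s open_ch close_ch (fix s open_ch close_ch)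

-- ===== LEMMAS AND PROOFS =====

-- Every index in the scan's result set was already in rem or is ≥ the current position.
theorem fixAltScan_mem_bound (o c : List Char) (l : List Char) :
    ∀ (i d : Int) (rem : PySem.Set Int) (j : Int),
      j ∈ fixAltScan o c (PySem.List.enumerate l i) d rem → j ∈ rem ∨ i ≤ j := by
  induction l with
  | nil => intro i d rem j h; simp [PySem.List.enumerate_nil, fixAltScan] at h; exact Or.inl h
  | cons ch rest ih =>
    intro i d rem j h
    rw [PySem.List.enumerate_cons] at h
    simp only [fixAltScan] at h
    split_ifs at h with h1 h2 h3
    · rcases ih (i+1) (d+1) rem j h with hr | hr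
      · exact Or.inl hr
      · exact Or.inr (by omega)
    · rcases ih (i+1) (d-1) rem j h with hr | hr
      · exact Or.inl hr
      · exact Or.inr (by omega)
    · rcases ih (i+1) d (PySem.Set.add rem i) j h with hr | hr
      · rw [PySem.Set.mem_add] at hr
        rcases hr with hr | hr
        · exact Or.inl hr
        · exact Or.inr (by omega)
      · exact Or.inr (by omega)
    · rcases ih (i+1) d rem j h with hr | hr
      · exact Or.inl hr
      · exact Or.inr (by omega)

-- The scan only ever adds to the set.
theorem fixAltScan_mono (o c : List Char) (l : List Char) :
    ∀ (i d : Int) (rem : PySem.Set Int) (j : Int),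
      j ∈ rem → j ∈ fixAltScan o c (PySem.List.enumerate l i) d rem := by
  induction l with
  | nil => intro i d rem j h; simpa [PySem.List.enumerate_nil, fixAltScan] using h
  | cons ch rest ih =>
    intro i d rem j h
    rw [PySem.List.enumerate_cons]
    simp only [fixAltScan]
    split_ifs with h1 h2 h3
    · exact ih (i+1) (d+1) rem j h
    · exact ih (i+1) (d-1) rem j h
    · exact ih (i+1) d (PySem.Set.add rem i) j (by rw [PySem.Set.mem_add]; exact Or.inl h)
    · exact ih (i+1) d rem j h

-- Main invariant: A's inline build equals B's filter of the enumeration by the final set.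
theorem fix_key (o c : List Char) (l : List Char) :
    ∀ (i d : Int) (res : List Char) (rem : PySem.Set Int),
      (∀ j ∈ rem, j < i) →
      fixLoop o c l d res =
        res ++ ((PySem.List.enumerate l i).filter
          (fun p => !(PySem.Set.contains (fixAltScan o c (PySem.List.enumerate l i) d rem) p.1))).map (·.2) := by
  induction l with
  | nil => intro i d res rem _; simp [PySem.List.enumerate_nil, fixAltScan, fixLoop]
  | cons ch rest ih =>
    intro i d res rem hlt
    rw [PySem.List.enumerate_cons]
    simp only [fixLoop, fixAltScan]
    split_ifs with h1 h2 h3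
    · -- open: kept, depth + 1
      have hni : i ∉ fixAltScan o c (PySem.List.enumerate rest (i+1)) (d+1) rem := by
        intro hmem
        rcases fixAltScan_mem_bound o c rest (i+1) (d+1) rem i hmem with hr | hr
        · exact absurd (hlt i hr) (by omega)
        · omega
      rw [List.filter_cons]
      simp only [Bool.not_eq_true', PySem.Set.contains_eq_listContains]
      rw [ih (i+1) (d+1) (res ++ [ch]) rem (fun j hj => by have := hlt j hj; omega)]
      simp [hni]
    · -- close, depth > 0: kept, depth - 1
      have hni : i ∉ fixAltScan o c (PySem.List.enumerate rest (i+1)) (d-1) rem := by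
        intro hmem
        rcases fixAltScan_mem_bound o c rest (i+1) (d-1) rem i hmem with hr | hr
        · exact absurd (hlt i hr) (by omega)
        · omega
      rw [List.filter_cons]
      simp only [Bool.not_eq_true', PySem.Set.contains_eq_listContains]
      rw [ih (i+1) (d-1) (res ++ [ch]) rem (fun j hj => by have := hlt j hj; omega)]
      simp [hni]
    · -- unmatched close: dropped, index i recorded
      have hin : i ∈ fixAltScan o c (PySem.List.enumerate rest (i+1)) d (PySem.Set.add rem i) :=
        fixAltScan_mono o c rest (i+1) d _ i (by rw [PySem.Set.mem_add]; exact Or.inr rfl)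
      rw [List.filter_cons]
      simp only [Bool.not_eq_true', PySem.Set.contains_eq_listContains]
      have hlt' : ∀ j ∈ PySem.Set.add rem i, j < i + 1 := by
        intro j hj
        rw [PySem.Set.mem_add] at hj
        rcases hj with hj | hj
        · have := hlt j hj; omega
        · omega
      rw [ih (i+1) d res (PySem.Set.add rem i) hlt']
      simp [hin]
    · -- other char: kept
      have hni : i ∉ fixAltScan o c (PySem.List.enumerate rest (i+1)) d rem := by
        intro hmem
        rcases fixAltScan_mem_bound o c rest (i+1) d rem i hmem with hr | hr
        · exact absurd (hlt i hr) (by omega)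
        · omega
      rw [List.filter_cons]
      simp only [Bool.not_eq_true', PySem.Set.contains_eq_listContains]
      rw [ih (i+1) d (res ++ [ch]) rem (fun j hj => by have := hlt j hj; omega)]
      simp [hni]

-- ===== VERDICT (by name: the statement is the Claim_ definition above) =====
theorem fix_spec : Claim_equal_fix := by
  intro s o c _
  unfold Spec_fix fix fix_alt
  rw [fix_key o.toList c.toList s.toList 0 0 [] PySem.Set.empty (by intro j hj; simp [PySem.Set.empty] at hj)]
  simp
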